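-- pv_equiv track=rewrite | github.com/jjoshua2/arc_agi | dupes/dbc1a6ce_group-042/test_correct/1366.py | transform
-- ===== SOURCE A (Python) =====
-- def transform(grid):
--     if not grid or not grid[0]:
--         return []
--     rows = len(grid)
--     cols = len(grid[0])
--     result = [row[:] for row in grid]
--
--     # Horizontal fills: for each row
--     for r in range(rows):
--         blue_cols = [c for c in range(cols) if grid[r][c] == 1]
--         if len(blue_cols) < 2:
--             continue
--         blue_cols.sort()
--         for i in range(len(blue_cols) - 1):
--             for c in range(blue_cols[i] + 1, blue_cols[i + 1]):
--                 result[r][c] = 8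
--
--     # Vertical fills: for each column
--     for c in range(cols):
--         blue_rows = [r for r in range(rows) if grid[r][c] == 1]
--         if len(blue_rows) < 2:
--             continue
--         blue_rows.sort()
--         for i in range(len(blue_rows) - 1):
--             for r in range(blue_rows[i] + 1, blue_rows[i + 1]):
--                 result[r][c] = 8
--
--     return result
-- ===== SOURCE B (Python) =====
-- def transform(grid):
--     if not grid or not grid[0]:
--         return []
--     cols = len(grid[0])
--
--     def blues(line):
--         return [i for i, v in enumerate(line) if v == 1]
--
--     def inside(b, i):
--         return len(b) > 0 and b[0] < i < b[-1]
--
--     rowspan = [blues(row[:cols]) for row in grid]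
--     colspan = [blues(col) for col in zip(*grid)]
--     return [[8 if c < cols and v != 1 and
--                   (inside(rowspan[r], c) or inside(colspan[c], r))
--              else v
--              for c, v in enumerate(row)]
--             for r, row in enumerate(grid)]
-- ===== Notes on version B (the rewrite author's own statement) =====
-- stated objective: alternative
-- what changed: A imperatively paints 8s into a mutable copy, looping over each consecutive pair of blue indices per row and per column; B never mutates: it precomputes blue-index lists per row and per column once, then builds the whole output grid functionally, deciding each cell from a per-cell predicate (non-blue and strictly inside the row's or column's outer blue span).
import Mathlib
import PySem

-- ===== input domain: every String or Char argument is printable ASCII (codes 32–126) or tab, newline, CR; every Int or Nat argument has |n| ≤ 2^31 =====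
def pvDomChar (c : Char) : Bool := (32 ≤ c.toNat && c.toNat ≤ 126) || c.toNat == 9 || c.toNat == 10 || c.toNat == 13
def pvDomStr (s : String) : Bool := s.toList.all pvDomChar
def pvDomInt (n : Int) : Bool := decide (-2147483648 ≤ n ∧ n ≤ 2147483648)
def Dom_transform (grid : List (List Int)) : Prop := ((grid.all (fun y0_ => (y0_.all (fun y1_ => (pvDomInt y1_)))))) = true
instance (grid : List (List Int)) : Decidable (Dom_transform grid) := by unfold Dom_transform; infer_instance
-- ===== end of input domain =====

-- B replaces A's imperative span-painting into a mutable copy by a functional rebuild of the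
-- grid: blue-index lists per row/column are computed once, and each output cell is decided by
-- a per-cell predicate (non-blue and strictly inside the outer blue span of its row or column).

-- ===== PORT A =====
-- result[r][c] = 8 : exact under Pre_transform, where r < len(result) and c < len(result[r])
def setCell8 (g : List (List Int)) (r c : Nat) : List (List Int) :=
  g.set r ((g.getD r []).set c 8)

-- Ranges and indices are hand-ported over Nat: Python's range(a, b) yields exactly the
-- integers a ≤ i < b with 0 ≤ a, which is List.range' a (b - a); every list access below
-- is in range under Pre_transform, where .getD is exact.
def transform (grid : List (List Int)) : List (List Int) :=
  if grid = [] ∨ grid.headD [] = [] then []      -- if not grid or not grid[0]: return []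
  else
    let rows := grid.length
    let cols := (grid.headD []).length
    let result := grid.map (fun row => row)      -- [row[:] for row in grid] (row[:] copies; value-equal)
    -- Horizontal fills: for each row
    let result := (List.range rows).foldl (fun result r =>
      let blueCols := (List.range cols).filter (fun c => (grid.getD r []).getD c 0 == 1)
      if blueCols.length < 2 then result
      else
        let blueCols := PySem.List.sorted blueCols (fun x => x) false   -- blue_cols.sort()
        (List.range (blueCols.length - 1)).foldl (fun result i =>
          (List.range' (blueCols.getD i 0 + 1) (blueCols.getD (i+1) 0 - (blueCols.getD i 0 + 1))).foldl
            (fun result c => setCell8 result r c) result) result) result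
    -- Vertical fills: for each column
    (List.range cols).foldl (fun result c =>
      let blueRows := (List.range rows).filter (fun r => (grid.getD r []).getD c 0 == 1)
      if blueRows.length < 2 then result
      else
        let blueRows := PySem.List.sorted blueRows (fun x => x) false   -- blue_rows.sort()
        (List.range (blueRows.length - 1)).foldl (fun result i =>
          (List.range' (blueRows.getD i 0 + 1) (blueRows.getD (i+1) 0 - (blueRows.getD i 0 + 1))).foldl
            (fun result r => setCell8 result r c) result) result) result

-- ===== PORT B =====
-- enumerate(xs) over Nat indices (every index Python produces here is ≥ 0)
def listEnum {α : Type} : Nat → List α → List (Nat × α)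
  | _, [] => []
  | i, x :: t => (i, x) :: listEnum (i+1) t

-- zip(*g): tuples of the first n elements of every row, n = the shortest row length;
-- exact (each access row.getD c is at c < n ≤ row.length)
def zipStar (g : List (List Int)) : List (List Int) :=
  match g with
  | [] => []
  | r0 :: rest =>
    let n := rest.foldl (fun m row => Nat.min m row.length) r0.length
    (List.range n).map (fun c => g.map (fun row => row.getD c 0))

-- blues(line) = [i for i, v in enumerate(line) if v == 1]
def bluesB (xs : List Int) : List Nat :=
  ((listEnum 0 xs).filter (fun p => p.2 == 1)).map (·.1)

-- inside(b, i) = len(b) > 0 and b[0] < i < b[-1]; b[0]/b[-1] read only when b is nonempty,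
-- where they are exactly getD 0 / getLastD
def insideB (b : List Nat) (i : Nat) : Bool :=
  decide (0 < b.length) && decide (b.getD 0 0 < i) && decide (i < b.getLastD 0)

def transform_alt (grid : List (List Int)) : List (List Int) :=
  if grid = [] ∨ grid.headD [] = [] then []
  else
    let cols := (grid.headD []).length
    let rowspan := grid.map (fun row => bluesB (row.take cols))   -- row[:cols] = take (cols ≥ 0)
    let colspan := (zipStar grid).map bluesB
    (listEnum 0 grid).map (fun rp =>
      (listEnum 0 rp.2).map (fun cv =>
        if decide (cv.1 < cols) && (cv.2 != 1) &&
           (insideB (rowspan.getD rp.1 []) cv.1 || insideB (colspan.getD cv.1 []) rp.1)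
        then 8 else cv.2))

-- ===== PRECONDITION & SPEC =====
-- Pre_ is exactly A's domain: when the first row is nonempty A raises IndexError as soon as
-- some row is shorter than it (when the first row is empty A answers before reading any
-- other row, so the bound below is vacuous there).
def Pre_transform (grid : List (List Int)) : Prop :=
  ∀ row ∈ grid, (grid.headD []).length ≤ row.length
instance (grid : List (List Int)) : Decidable (Pre_transform grid) := by unfold Pre_transform; infer_instance
def pvWitness_transform : List (List Int) := [[1, 0, 1], [0, 1, 0], [1, 0, 1]]

def Spec_transform (grid : List (List Int)) (out : List (List Int)) : Prop := out = transform_alt grid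
instance (grid : List (List Int)) (out : List (List Int)) : Decidable (Spec_transform grid out) := by unfold Spec_transform; infer_instance

-- ===== CLAIM (what is proved, stated in full; the proofs are below) =====
def Claim_equal_transform : Prop := ∀ (grid : List (List Int)), Dom_transform grid → Pre_transform grid → Spec_transform grid (transform grid)

-- ===== LEMMAS AND PROOFS =====

-- cell g r c = g[r][c] (0 when out of range)
def cell (g : List (List Int)) (r c : Nat) : Int := (g.getD r []).getD c 0

theorem getD_set {α : Type} (l : List α) (i j : Nat) (a : α) (d : α) :
    (l.set i a).getD j d = if i = j ∧ i < l.length then a else l.getD j d := by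
  simp only [List.getD, List.getElem?_set]
  by_cases h1 : i = j
  · subst h1
    by_cases h2 : i < l.length
    · simp [h2]
    · have h3 : l[i]? = none := by simp; omega
      simp [h2]
  · simp [h1]

theorem length_setCell8 (g : List (List Int)) (r c : Nat) : (setCell8 g r c).length = g.length := by
  simp [setCell8]

theorem getD_len_setCell8 (g : List (List Int)) (r c r' : Nat) :
    ((setCell8 g r c).getD r' []).length = (g.getD r' []).length := by
  unfold setCell8
  rw [getD_set]
  split_ifs with h
  · rw [List.length_set, h.1]
  · rfl

theorem cell_setCell8 (g : List (List Int)) (r c r' c' : Nat) :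
    cell (setCell8 g r c) r' c' =
      if r' = r ∧ c' = c ∧ r < g.length ∧ c < (g.getD r []).length then 8 else cell g r' c' := by
  unfold cell setCell8
  by_cases hrr : r = r'
  · subst hrr
    rw [getD_set]
    by_cases hrl : r < g.length
    · rw [if_pos (⟨rfl, hrl⟩ : r = r ∧ r < g.length), getD_set]
      split_ifs with h1 h2 h2
      · rfl
      · exact absurd ⟨rfl, h1.1.symm, hrl, h1.2⟩ h2
      · exact absurd ⟨h2.2.1.symm, h2.2.2.2⟩ h1
      · rfl
    · rw [if_neg (by tauto), if_neg (by tauto)]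
  · rw [getD_set, if_neg (by tauto), if_neg (by tauto)]

def applyW (g : List (List Int)) (ws : List (Nat × Nat)) : List (List Int) :=
  ws.foldl (fun g p => setCell8 g p.1 p.2) g

theorem length_applyW (g : List (List Int)) (ws : List (Nat × Nat)) : (applyW g ws).length = g.length := by
  induction ws generalizing g with
  | nil => rfl
  | cons p t ih =>
    have h : applyW g (p :: t) = applyW (setCell8 g p.1 p.2) t := rfl
    rw [h, ih, length_setCell8]

theorem getD_len_applyW (g : List (List Int)) (ws : List (Nat × Nat)) (r : Nat) :
    ((applyW g ws).getD r []).length = (g.getD r []).length := by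
  induction ws generalizing g with
  | nil => rfl
  | cons p t ih =>
    have h : applyW g (p :: t) = applyW (setCell8 g p.1 p.2) t := rfl
    rw [h, ih, getD_len_setCell8]

theorem cell_applyW (g : List (List Int)) (ws : List (Nat × Nat)) (r c : Nat) :
    cell (applyW g ws) r c =
      if (r, c) ∈ ws ∧ r < g.length ∧ c < (g.getD r []).length then 8 else cell g r c := by
  induction ws generalizing g with
  | nil => simp [applyW]
  | cons p t ih =>
    have h : applyW g (p :: t) = applyW (setCell8 g p.1 p.2) t := rfl
    rw [h, ih, length_setCell8, getD_len_setCell8, cell_setCell8]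
    by_cases hin : r < g.length ∧ c < (g.getD r []).length
    · by_cases hm : (r, c) ∈ t
      · rw [if_pos ⟨hm, hin⟩, if_pos ⟨List.mem_cons_of_mem p hm, hin⟩]
      · rw [if_neg (by tauto)]
        by_cases hp : p = (r, c)
        · rw [if_pos (by subst hp; exact ⟨rfl, rfl, hin⟩),
            if_pos ⟨by simp [hp.symm], hin⟩]
        · rw [if_neg (by rintro ⟨h1, h2, -⟩; exact hp (by rw [Prod.ext_iff]; exact ⟨h1.symm, h2.symm⟩)),
            if_neg (by rintro ⟨hmem, -⟩; rcases List.mem_cons.mp hmem with he | hmt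
                       · exact hp he.symm
                       · exact hm hmt)]
    · rw [if_neg (by tauto),
        if_neg (by rintro ⟨h1, h2, h3, h4⟩; subst h1; subst h2; exact hin ⟨h3, h4⟩),
        if_neg (by tauto)]

def betw (a b : Nat) : List Nat := List.range' (a+1) (b - (a+1))
def gaps : List Nat → List Nat
  | a :: b :: t => betw a b ++ gaps (b :: t)
  | _ => []
def bluesAux : Nat → List Int → List Nat
  | _, [] => []
  | i, x :: t => if x == 1 then i :: bluesAux (i+1) t else bluesAux (i+1) t

theorem mem_betw (a b c : Nat) : c ∈ betw a b ↔ a < c ∧ c < b := by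
  rw [betw, List.mem_range'_1]; omega

theorem getLastD_cons_mem (b : Nat) (t : List Nat) : (b :: t).getLastD 0 ∈ b :: t := by
  induction t generalizing b with
  | nil => simp
  | cons x t ih => simpa using List.mem_cons_of_mem b (ih x)

theorem le_getLastD_cons (b : Nat) (t : List Nat) (hs : (b :: t).Pairwise (· < ·)) :
    b ≤ (b :: t).getLastD 0 := by
  rcases List.mem_cons.mp (getLastD_cons_mem b t) with h | h
  · omega
  · have := (List.pairwise_cons.mp hs).1 _ h
    omega

theorem mem_gaps (B : List Nat) (hs : B.Pairwise (· < ·)) (c : Nat) :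
    c ∈ gaps B ↔ B.headD 0 < c ∧ c < B.getLastD 0 ∧ c ∉ B := by
  induction B with
  | nil => simp [gaps]
  | cons a t ih =>
    cases t with
    | nil => simp [gaps]; omega
    | cons b t2 =>
      have hs' : (b :: t2).Pairwise (· < ·) := (List.pairwise_cons.mp hs).2
      have hab : a < b := (List.pairwise_cons.mp hs).1 b (by simp)
      have hbl := le_getLastD_cons b t2 hs'
      rw [show gaps (a :: b :: t2) = betw a b ++ gaps (b :: t2) from rfl]
      rw [List.mem_append, mem_betw, ih hs']
      constructor
      · rintro (⟨h1, h2⟩ | ⟨h1, h2, h3⟩)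
        · refine ⟨by simpa using h1, by simpa using lt_of_lt_of_le h2 hbl, ?_⟩
          intro hm
          rcases List.mem_cons.mp hm with rfl | hm2
          · omega
          · have := (List.pairwise_cons.mp hs').1
            rcases List.mem_cons.mp hm2 with rfl | hm3
            · omega
            · exact absurd (this c hm3) (by omega)
        · refine ⟨by simp at h1 ⊢; omega, by simpa using h2, ?_⟩
          intro hm
          rcases List.mem_cons.mp hm with rfl | hm2
          · simp at h1; omega
          · exact h3 hm2
      · rintro ⟨h1, h2, h3⟩
        simp only [List.getLastD_cons] at h2 ⊢
        by_cases hcb : c < b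
        · left; exact ⟨by simpa using h1, hcb⟩
        · right
          refine ⟨?_, ?_, fun hm => h3 (List.mem_cons_of_mem a hm)⟩
          · simp only [List.headD_cons]
            have : c ≠ b := fun he => h3 (by simp [he])
            omega
          · simpa using h2

theorem mem_bluesAux (xs : List Int) (i c : Nat) :
    c ∈ bluesAux i xs ↔ i ≤ c ∧ c - i < xs.length ∧ xs.getD (c - i) 0 = 1 := by
  induction xs generalizing i with
  | nil => simp [bluesAux]
  | cons x t ih =>
    rw [bluesAux]
    by_cases hx : x = 1
    · rw [hx, if_pos (by simp), List.mem_cons, ih]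
      constructor
      · rintro (rfl | ⟨h1, h2, h3⟩)
        · simp
        · refine ⟨by omega, by simp; omega, ?_⟩
          rw [show c - i = (c - (i+1)) + 1 by omega, List.getD_cons_succ]
          exact h3
      · rintro ⟨h1, h2, h3⟩
        by_cases hc : c = i
        · exact Or.inl hc
        · right
          rw [show c - i = (c - (i+1)) + 1 by omega, List.getD_cons_succ] at h3
          exact ⟨by omega, by simp at h2; omega, h3⟩
    · rw [if_neg (by simpa using hx), ih]
      constructor
      · rintro ⟨h1, h2, h3⟩
        refine ⟨by omega, by simp; omega, ?_⟩
        rw [show c - i = (c - (i+1)) + 1 by omega, List.getD_cons_succ]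
        exact h3
      · rintro ⟨h1, h2, h3⟩
        have hc : c ≠ i := by
          rintro rfl
          rw [Nat.sub_self, List.getD_cons_zero] at h3
          exact hx h3
        rw [show c - i = (c - (i+1)) + 1 by omega, List.getD_cons_succ] at h3
        exact ⟨by omega, by simp at h2; omega, h3⟩

theorem bluesAux_ge (xs : List Int) (i c : Nat) (h : c ∈ bluesAux i xs) : i ≤ c :=
  ((mem_bluesAux xs i c).mp h).1

theorem pairwise_bluesAux (xs : List Int) (i : Nat) : (bluesAux i xs).Pairwise (· < ·) := by
  induction xs generalizing i with
  | nil => simp [bluesAux]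
  | cons x t ih =>
    rw [bluesAux]
    split_ifs
    · exact List.pairwise_cons.mpr ⟨fun c hc => by have := bluesAux_ge t (i+1) c hc; omega, ih (i+1)⟩
    · exact ih (i+1)

theorem getD_zero_eq_headD {α : Type} (l : List α) (d : α) : l.getD 0 d = l.headD d := by
  cases l <;> rfl

theorem foldl_pairs_eq_gaps (B : List Nat) (step : List (List Int) → Nat → List (List Int))
    (g : List (List Int)) :
    (List.range (B.length - 1)).foldl (fun g i =>
        (List.range' (B.getD i 0 + 1) (B.getD (i+1) 0 - (B.getD i 0 + 1))).foldl step g) g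
      = (gaps B).foldl step g := by
  induction B generalizing g with
  | nil => rfl
  | cons a t ih =>
    cases t with
    | nil => rfl
    | cons b t2 =>
      have hlen : (a :: b :: t2).length - 1 = ((b :: t2).length - 1) + 1 := by simp
      rw [hlen, List.range_succ_eq_map, List.foldl_cons, List.foldl_map]
      have hcong : ∀ (g : List (List Int)),
          (List.range ((b :: t2).length - 1)).foldl (fun g i =>
            (List.range' ((a :: b :: t2).getD (i+1) 0 + 1)
              ((a :: b :: t2).getD (i+1+1) 0 - ((a :: b :: t2).getD (i+1) 0 + 1))).foldl step g) g
          = (List.range ((b :: t2).length - 1)).foldl (fun g i =>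
            (List.range' ((b :: t2).getD i 0 + 1)
              ((b :: t2).getD (i+1) 0 - ((b :: t2).getD i 0 + 1))).foldl step g) g := by
        intro g; rfl
      rw [hcong, ih]
      show (gaps (b :: t2)).foldl step ((betw a b).foldl step g)
        = (betw a b ++ gaps (b :: t2)).foldl step g
      rw [List.foldl_append]

theorem listEnum_eq_map_range {α : Type} (d : α) (xs : List α) (i : Nat) :
    listEnum i xs = (List.range xs.length).map (fun k => (i + k, xs.getD k d)) := by
  induction xs generalizing i with
  | nil => rfl
  | cons x t ih =>
    rw [listEnum, ih (i+1)]
    rw [show (x :: t).length = t.length + 1 from rfl, List.range_succ_eq_map, List.map_cons,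
      List.map_map]
    refine congrArg₂ _ (by simp) ?_
    refine List.map_congr_left fun k _ => ?_
    simp only [Function.comp_apply, List.getD_cons_succ]
    refine congrArg₂ _ (by omega) rfl

theorem listEnum_zero {α : Type} (d : α) (xs : List α) :
    listEnum 0 xs = (List.range xs.length).map (fun k => (k, xs.getD k d)) := by
  rw [listEnum_eq_map_range d]
  exact List.map_congr_left fun k _ => by rw [Nat.zero_add]

theorem bluesAux_eq_filter_range (xs : List Int) :
    bluesAux 0 xs = (List.range xs.length).filter (fun c => xs.getD c 0 == 1) := by
  have key : ∀ (t : List Int) (i : Nat),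
      bluesAux i t = ((List.range t.length).map (fun k => i + k)).filter
        (fun c => t.getD (c - i) 0 == 1) := by
    intro t
    induction t with
    | nil => intro i; rfl
    | cons x t2 ih =>
      intro i
      rw [bluesAux, show (x :: t2).length = t2.length + 1 from rfl, List.range_succ_eq_map,
        List.map_cons, List.map_map, List.filter_cons]
      have he : ((List.range t2.length).map ((fun k => i + k) ∘ fun i => i + 1)).filter
            (fun c => (x :: t2).getD (c - i) 0 == 1)
          = bluesAux (i+1) t2 := by
        rw [ih (i+1)]
        have hm : (List.range t2.length).map ((fun k => i + k) ∘ fun j => j + 1)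
            = (List.range t2.length).map (fun k => (i + 1) + k) := by
          refine List.map_congr_left fun k _ => ?_
          simp only [Function.comp_apply]; omega
        rw [hm]
        refine List.filter_congr fun c hc => ?_
        simp only [List.mem_map] at hc
        obtain ⟨k, -, rfl⟩ := hc
        have : (i + 1 + k) - i = ((i + 1 + k) - (i + 1)) + 1 := by omega
        rw [this, List.getD_cons_succ]
      simp only [Nat.add_zero, Nat.sub_self, List.getD_cons_zero]
      split_ifs with hx
      · rw [he]
      · rw [he]
  rw [key xs 0]
  have h0 : (List.range xs.length).map (fun k => 0 + k) = List.range xs.length := by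
    have : (List.range xs.length).map (fun k => 0 + k) = (List.range xs.length).map id :=
      List.map_congr_left fun k _ => Nat.zero_add k
    rw [this, List.map_id]
  rw [h0]
  refine List.filter_congr fun c _ => by rw [Nat.sub_zero]

def colOf (g : List (List Int)) (c : Nat) : List Int := g.map (fun row => row.getD c 0)

def rowWrites (g : List (List Int)) (f : List Int → List Nat) : List (Nat × Nat) :=
  (List.range g.length).flatMap (fun r => (f (g.getD r [])).map (fun c => (r, c)))
def colWrites (g : List (List Int)) (f : List Int → List Nat) : List (Nat × Nat) :=
  (List.range (g.headD []).length).flatMap (fun c => (f (colOf g c)).map (fun r => (r, c)))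

theorem applyW_append (g : List (List Int)) (ws₁ ws₂ : List (Nat × Nat)) :
    applyW g (ws₁ ++ ws₂) = applyW (applyW g ws₁) ws₂ := by
  simp [applyW, List.foldl_append]

theorem foldl_applyW_flatMap {α : Type} (l : List α) (f : α → List (Nat × Nat)) (g : List (List Int)) :
    l.foldl (fun g x => applyW g (f x)) g = applyW g (l.flatMap f) := by
  induction l generalizing g with
  | nil => simp [applyW]
  | cons x t ih =>
    rw [List.flatMap_cons, List.foldl_cons, ih]
    exact (applyW_append g (f x) (t.flatMap f)).symm

theorem applyW_map_row (g : List (List Int)) (r : Nat) (l : List Nat) :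
    applyW g (l.map (fun c => (r, c))) = l.foldl (fun g c => setCell8 g r c) g := by
  rw [applyW, List.foldl_map]

theorem applyW_map_col (g : List (List Int)) (c : Nat) (l : List Nat) :
    applyW g (l.map (fun r => (r, c))) = l.foldl (fun g r => setCell8 g r c) g := by
  rw [applyW, List.foldl_map]

theorem gaps_short (B : List Nat) (h : B.length < 2) : gaps B = [] := by
  match B, h with
  | [], _ => rfl
  | [a], _ => rfl

theorem getD_take (l : List Int) (n c : Nat) (hc : c < n) :
    (l.take n).getD c 0 = l.getD c 0 := by
  rw [List.getD_eq_getElem?_getD, List.getD_eq_getElem?_getD, List.getElem?_take_of_lt hc]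

theorem blues_row_eq (grid : List (List Int)) (hpre : Pre_transform grid) (r : Nat) (hr : r < grid.length) :
    (List.range (grid.headD []).length).filter (fun c => (grid.getD r []).getD c 0 == 1)
      = bluesAux 0 ((grid.getD r []).take (grid.headD []).length) := by
  have hmem : grid.getD r [] ∈ grid := by
    rw [List.getD_eq_getElem?_getD, List.getElem?_eq_getElem hr]
    exact List.getElem_mem hr
  rw [bluesAux_eq_filter_range, List.length_take,
    Nat.min_eq_left (hpre (grid.getD r []) hmem)]
  refine (List.filter_congr fun c hc => ?_).symm
  rw [List.mem_range] at hc
  rw [getD_take _ _ _ hc]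

theorem colOf_getD (g : List (List Int)) (c r : Nat) (hr : r < g.length) :
    (colOf g c).getD r 0 = (g.getD r []).getD c 0 := by
  rw [colOf, List.getD_eq_getElem?_getD, List.getElem?_map,
    List.getElem?_eq_getElem hr]
  simp only [Option.map_some, Option.getD_some, List.getD_eq_getElem?_getD,
    List.getElem?_eq_getElem hr, Option.getD_some]

theorem blues_col_eq (grid : List (List Int)) (c : Nat) :
    (List.range grid.length).filter (fun r => (grid.getD r []).getD c 0 == 1)
      = bluesAux 0 (colOf grid c) := by
  rw [bluesAux_eq_filter_range]
  have hl : (colOf grid c).length = grid.length := by simp [colOf]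
  rw [hl]
  refine List.filter_congr fun r hr => ?_
  rw [List.mem_range] at hr
  rw [colOf_getD grid c r hr]

theorem pairwise_le_blues (xs : List Int) :
    (bluesAux 0 xs).Pairwise (fun a b => (fun x => x) a ≤ (fun x => x) b) :=
  (pairwise_bluesAux xs 0).imp le_of_lt

theorem bodyH_eq (grid : List (List Int)) (hpre : Pre_transform grid) (r : Nat) (hr : r < grid.length)
    (g : List (List Int)) :
    (let blueCols := (List.range (grid.headD []).length).filter
        (fun c => (grid.getD r []).getD c 0 == 1);
     if blueCols.length < 2 then g
     else
       let blueCols := PySem.List.sorted blueCols (fun x => x) false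
       (List.range (blueCols.length - 1)).foldl (fun result i =>
         (List.range' (blueCols.getD i 0 + 1) (blueCols.getD (i+1) 0 - (blueCols.getD i 0 + 1))).foldl
           (fun result c => setCell8 result r c) result) g)
    = applyW g ((gaps (bluesAux 0 ((grid.getD r []).take (grid.headD []).length))).map
        (fun c => (r, c))) := by
  simp only [blues_row_eq grid hpre r hr,
    PySem.List.sorted_eq_self_of_pairwise _ _
      (pairwise_le_blues ((grid.getD r []).take (grid.headD []).length))]
  by_cases hlen : (bluesAux 0 ((grid.getD r []).take (grid.headD []).length)).length < 2
  · rw [if_pos hlen, gaps_short _ hlen]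
    rfl
  · rw [if_neg hlen, foldl_pairs_eq_gaps, applyW_map_row]

theorem bodyV_eq (grid : List (List Int)) (c : Nat) (g : List (List Int)) :
    (let blueRows := (List.range grid.length).filter
        (fun r => (grid.getD r []).getD c 0 == 1);
     if blueRows.length < 2 then g
     else
       let blueRows := PySem.List.sorted blueRows (fun x => x) false
       (List.range (blueRows.length - 1)).foldl (fun result i =>
         (List.range' (blueRows.getD i 0 + 1) (blueRows.getD (i+1) 0 - (blueRows.getD i 0 + 1))).foldl
           (fun result r => setCell8 result r c) result) g)
    = applyW g ((gaps (bluesAux 0 (colOf grid c))).map (fun r => (r, c))) := by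
  simp only [blues_col_eq grid c,
    PySem.List.sorted_eq_self_of_pairwise _ _ (pairwise_le_blues (colOf grid c))]
  by_cases hlen : (bluesAux 0 (colOf grid c)).length < 2
  · rw [if_pos hlen, gaps_short _ hlen]
    rfl
  · rw [if_neg hlen, foldl_pairs_eq_gaps, applyW_map_col]

theorem transform_eq_applyW (grid : List (List Int)) (hpre : Pre_transform grid)
    (hg : ¬(grid = [] ∨ grid.headD [] = [])) :
    transform grid = applyW grid
      (rowWrites grid (fun xs => gaps (bluesAux 0 (xs.take (grid.headD []).length)))
        ++ colWrites grid (fun xs => gaps (bluesAux 0 xs))) := by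
  unfold transform
  rw [if_neg hg]
  dsimp only
  rw [applyW_append]
  have hH : (List.range grid.length).foldl (fun result r =>
      let blueCols := (List.range (grid.headD []).length).filter
          (fun c => (grid.getD r []).getD c 0 == 1)
      if blueCols.length < 2 then result
      else
        let blueCols := PySem.List.sorted blueCols (fun x => x) false
        (List.range (blueCols.length - 1)).foldl (fun result i =>
          (List.range' (blueCols.getD i 0 + 1) (blueCols.getD (i+1) 0 - (blueCols.getD i 0 + 1))).foldl
            (fun result c => setCell8 result r c) result) result) (grid.map (fun row => row))
      = applyW grid (rowWrites grid
        (fun xs => gaps (bluesAux 0 (xs.take (grid.headD []).length)))) := by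
    rw [List.map_id']
    rw [PySem.List.foldl_congr_mem _ _
      (fun g r => applyW g ((gaps (bluesAux 0 ((grid.getD r []).take
        (grid.headD []).length))).map (fun c => (r, c)))) _
      (fun acc r hrm => bodyH_eq grid hpre r (List.mem_range.mp hrm) acc)]
    exact foldl_applyW_flatMap _ _ _
  rw [hH]
  rw [PySem.List.foldl_congr_mem _ _
    (fun g c => applyW g ((gaps (bluesAux 0 (colOf grid c))).map (fun r => (r, c)))) _
    (fun acc c _ => bodyV_eq grid c acc)]
  exact foldl_applyW_flatMap _ _ _

theorem blues_enum_eq (xs : List Int) : bluesB xs = bluesAux 0 xs := by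
  rw [bluesB, listEnum_eq_map_range 0, List.filter_map, List.map_map]
  have h1 : (List.range xs.length).filter ((fun cv : Nat × Int => cv.2 == 1) ∘
      (fun k => (0 + k, xs.getD k 0))) = (List.range xs.length).filter (fun c => xs.getD c 0 == 1) :=
    List.filter_congr fun k _ => rfl
  rw [h1, ← bluesAux_eq_filter_range]
  have h2 : ((fun p : Nat × Int => p.1) ∘ (fun k => (0 + k, xs.getD k 0))) = fun k => k :=
    funext fun k => Nat.zero_add k
  rw [h2, List.map_id']

theorem foldl_min_const (l : List (List Int)) (C : Nat) (h : ∀ x ∈ l, C ≤ x.length) :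
    l.foldl (fun m row => Nat.min m row.length) C = C := by
  induction l with
  | nil => rfl
  | cons x t ih =>
    rw [List.foldl_cons, show C.min x.length = C from Nat.min_eq_left (h x (by simp))]
    exact ih fun y hy => h y (List.mem_cons_of_mem x hy)

theorem zipStar_eq (grid : List (List Int)) (hpre : Pre_transform grid)
    (hg : ¬(grid = [] ∨ grid.headD [] = [])) :
    zipStar grid = (List.range (grid.headD []).length).map (colOf grid) := by
  match grid, hg with
  | r0 :: rest, hg =>
    show (List.range (rest.foldl (fun m row => Nat.min m row.length) r0.length)).map _ = _
    rw [foldl_min_const rest r0.length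
      (fun y hy => hpre y (List.mem_cons_of_mem r0 hy))]
    rfl

-- getD of a map at an in-range index
theorem getD_map_of_lt {α β : Type} (f : α → β) (l : List α) (r : Nat) (d : β) (d0 : α)
    (h : r < l.length) : (l.map f).getD r d = f (l.getD r d0) := by
  rw [List.getD_eq_getElem?_getD, List.getElem?_map, List.getElem?_eq_getElem h]
  simp only [Option.map_some, Option.getD_some, List.getD_eq_getElem?_getD,
    List.getElem?_eq_getElem h, Option.getD_some]

-- getD into List.range at an in-range index
theorem getD_range (n c : Nat) (h : c < n) : (List.range n).getD c 0 = c := by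
  rw [List.getD_eq_getElem?_getD, List.getElem?_range h]
  rfl

-- the Prop-level reading of insideB
theorem insideB_iff (b : List Nat) (i : Nat) :
    insideB b i = true ↔ b ≠ [] ∧ b.getD 0 0 < i ∧ i < b.getLastD 0 := by
  simp [insideB, List.length_pos_iff_ne_nil, and_assoc]

-- gap membership = non-blue and strictly inside the outer blue span
theorem mem_gaps_iff_inside (xs : List Int) (c : Nat) :
    c ∈ gaps (bluesAux 0 xs)
      ↔ (insideB (bluesAux 0 xs) c = true) ∧ ¬(c < xs.length ∧ xs.getD c 0 = 1) := by
  rw [mem_gaps _ (pairwise_bluesAux xs 0), insideB_iff, ← getD_zero_eq_headD]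
  have hmem : c ∈ bluesAux 0 xs ↔ c < xs.length ∧ xs.getD c 0 = 1 := by
    rw [mem_bluesAux]; simp
  constructor
  · rintro ⟨h1, h2, h3⟩
    have hne : bluesAux 0 xs ≠ [] := by
      intro he; rw [he] at h1 h2; simp only [List.getD_nil, List.getLastD_nil] at h1 h2; omega
    exact ⟨⟨hne, h1, h2⟩, fun h => h3 (hmem.mpr h)⟩
  · rintro ⟨⟨-, h1, h2⟩, h3⟩
    exact ⟨h1, h2, fun hm => h3 (hmem.mp hm)⟩

theorem getLastD_lt_length (xs : List Int) (h : bluesAux 0 xs ≠ []) :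
    (bluesAux 0 xs).getLastD 0 < xs.length := by
  obtain ⟨b, t, hbt⟩ := List.exists_cons_of_ne_nil h
  have hlm : (bluesAux 0 xs).getLastD 0 ∈ bluesAux 0 xs := by
    rw [hbt]; exact getLastD_cons_mem b t
  have := ((mem_bluesAux xs 0 _).mp hlm).2.1
  omega

-- membership in the write lists
theorem mem_rowWrites (g : List (List Int)) (f : List Int → List Nat) (r c : Nat) :
    (r, c) ∈ rowWrites g f ↔ r < g.length ∧ c ∈ f (g.getD r []) := by
  simp only [rowWrites, List.mem_flatMap, List.mem_map, List.mem_range, Prod.mk.injEq]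
  constructor
  · rintro ⟨r', hr', c', hc', rfl, rfl⟩; exact ⟨hr', hc'⟩
  · rintro ⟨hr, hc⟩; exact ⟨r, hr, c, hc, rfl, rfl⟩

theorem mem_colWrites (g : List (List Int)) (f : List Int → List Nat) (r c : Nat) :
    (r, c) ∈ colWrites g f ↔ c < (g.headD []).length ∧ r ∈ f (colOf g c) := by
  simp only [colWrites, List.mem_flatMap, List.mem_map, List.mem_range, Prod.mk.injEq]
  constructor
  · rintro ⟨c', hc', r', hr', rfl, rfl⟩; exact ⟨hc', hr'⟩
  · rintro ⟨hc, hr⟩; exact ⟨c, hc, r, hr, rfl, rfl⟩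

-- the combined characterisation: a write hits (r,c) iff B's per-cell predicate holds
theorem mem_writes_iff_pred (grid : List (List Int)) (hpre : Pre_transform grid)
    (r c : Nat) (hr : r < grid.length) :
    ((r, c) ∈ rowWrites grid (fun xs => gaps (bluesAux 0 (xs.take (grid.headD []).length)))
        ++ colWrites grid (fun xs => gaps (bluesAux 0 xs)))
      ↔ (c < (grid.headD []).length ∧ (grid.getD r []).getD c 0 ≠ 1 ∧
          (insideB (bluesAux 0 ((grid.getD r []).take (grid.headD []).length)) c = true ∨
           insideB (bluesAux 0 (colOf grid c)) r = true)) := by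
  have hmemrow : grid.getD r [] ∈ grid := by
    rw [List.getD_eq_getElem?_getD, List.getElem?_eq_getElem hr]
    exact List.getElem_mem hr
  have hrowlen : (grid.headD []).length ≤ (grid.getD r []).length := hpre _ hmemrow
  have htakelen : ((grid.getD r []).take (grid.headD []).length).length = (grid.headD []).length := by
    rw [List.length_take, Nat.min_eq_left hrowlen]
  have hcollen : (colOf grid c).length = grid.length := by simp [colOf]
  rw [List.mem_append, mem_rowWrites, mem_colWrites]
  constructor
  · rintro (⟨-, hg⟩ | ⟨hc, hg⟩)
    · rw [mem_gaps_iff_inside] at hg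
      obtain ⟨hin, hnb⟩ := hg
      have hne := ((insideB_iff _ _).mp hin).1
      have hlast := ((insideB_iff _ _).mp hin).2.2
      have hclt : c < (grid.headD []).length := by
        have := getLastD_lt_length _ hne
        rw [htakelen] at this; omega
      refine ⟨hclt, ?_, Or.inl hin⟩
      intro hv
      exact hnb ⟨by omega, by rw [getD_take _ _ _ hclt]; exact hv⟩
    · rw [mem_gaps_iff_inside] at hg
      obtain ⟨hin, hnb⟩ := hg
      refine ⟨hc, ?_, Or.inr hin⟩
      intro hv
      exact hnb ⟨by omega, by rw [colOf_getD grid c r hr]; exact hv⟩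
  · rintro ⟨hc, hv, hin | hin⟩
    · left
      refine ⟨hr, (mem_gaps_iff_inside _ _).mpr ⟨hin, ?_⟩⟩
      rintro ⟨-, hb⟩
      rw [getD_take _ _ _ hc] at hb
      exact hv hb
    · right
      refine ⟨hc, (mem_gaps_iff_inside _ _).mpr ⟨hin, ?_⟩⟩
      rintro ⟨-, hb⟩
      rw [colOf_getD grid c r hr] at hb
      exact hv hb

-- transform_alt computed cellwise
theorem length_transform_alt (grid : List (List Int)) (hg : ¬(grid = [] ∨ grid.headD [] = [])) :
    (transform_alt grid).length = grid.length := by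
  unfold transform_alt
  rw [if_neg hg]
  simp only [List.length_map, listEnum_zero ([] : List Int) grid, List.length_map, List.length_range]

theorem transform_alt_getD (grid : List (List Int)) (hg : ¬(grid = [] ∨ grid.headD [] = []))
    (r : Nat) (hr : r < grid.length) :
    (transform_alt grid).getD r []
      = (listEnum 0 (grid.getD r [])).map (fun cv =>
          if decide (cv.1 < (grid.headD []).length) && (cv.2 != 1) &&
             (insideB ((grid.map (fun row => bluesB (row.take (grid.headD []).length))).getD r []) cv.1 ||
              insideB (((zipStar grid).map bluesB).getD cv.1 []) r)
          then 8 else cv.2) := by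
  unfold transform_alt
  rw [if_neg hg]
  dsimp only
  rw [listEnum_zero ([] : List Int) grid, List.map_map]
  rw [getD_map_of_lt _ _ r [] 0 (by rwa [List.length_range]), getD_range _ _ hr]
  rfl

theorem cell_transform_alt (grid : List (List Int)) (hpre : Pre_transform grid)
    (hg : ¬(grid = [] ∨ grid.headD [] = [])) (r c : Nat) (hr : r < grid.length)
    (hc : c < (grid.getD r []).length) :
    cell (transform_alt grid) r c
      = if (c < (grid.headD []).length ∧ (grid.getD r []).getD c 0 ≠ 1 ∧
            (insideB (bluesAux 0 ((grid.getD r []).take (grid.headD []).length)) c = true ∨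
             insideB (bluesAux 0 (colOf grid c)) r = true))
        then 8 else cell grid r c := by
  rw [cell, transform_alt_getD grid hg r hr, listEnum_zero (0 : Int) (grid.getD r []),
    List.map_map, getD_map_of_lt _ _ c 0 0 (by rwa [List.length_range]),
    getD_range _ _ hc]
  simp only [Function.comp_apply]
  have hrowspan : (grid.map (fun row => bluesB (row.take (grid.headD []).length))).getD r []
      = bluesAux 0 ((grid.getD r []).take (grid.headD []).length) := by
    rw [getD_map_of_lt _ _ r [] [] hr, blues_enum_eq]
  have hcolspan : c < (grid.headD []).length →
      ((zipStar grid).map bluesB).getD c [] = bluesAux 0 (colOf grid c) := by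
    intro hcc
    rw [zipStar_eq grid hpre hg, List.map_map,
      getD_map_of_lt _ _ c [] 0 (by rwa [List.length_range]),
      getD_range _ _ hcc]
    simp only [Function.comp_apply, blues_enum_eq]
  rw [hrowspan]
  by_cases hcc : c < (grid.headD []).length
  · rw [hcolspan hcc]
    refine if_congr ?_ rfl rfl
    simp only [Bool.and_eq_true, Bool.or_eq_true, decide_eq_true_iff, bne_iff_ne]
    constructor
    · rintro ⟨⟨h1, h2⟩, h3⟩; exact ⟨h1, h2, h3⟩
    · rintro ⟨h1, h2, h3⟩; exact ⟨⟨h1, h2⟩, h3⟩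
  · refine if_congr ?_ rfl rfl
    constructor
    · intro hb
      exfalso
      have h1 := ((Bool.and_eq_true _ _).mp ((Bool.and_eq_true _ _).mp hb).1).1
      exact hcc (of_decide_eq_true h1)
    · rintro ⟨h1, -⟩; exact absurd h1 hcc

theorem getD_len_transform_alt (grid : List (List Int)) (hg : ¬(grid = [] ∨ grid.headD [] = []))
    (r : Nat) :
    ((transform_alt grid).getD r []).length = (grid.getD r []).length := by
  by_cases hr : r < grid.length
  · rw [transform_alt_getD grid hg r hr, List.length_map,
      listEnum_zero (0 : Int) (grid.getD r []), List.length_map, List.length_range]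
  · have h1 : (transform_alt grid).getD r [] = [] := by
      rw [List.getD_eq_getElem?_getD, List.getElem?_eq_none (by rw [length_transform_alt grid hg]; omega)]
      rfl
    have h2 : grid.getD r [] = [] := by
      rw [List.getD_eq_getElem?_getD, List.getElem?_eq_none (by omega)]
      rfl
    rw [h1, h2]

theorem main_eq (grid : List (List Int)) (hpre : Pre_transform grid) :
    transform grid = transform_alt grid := by
  by_cases hg : grid = [] ∨ grid.headD [] = []
  · unfold transform transform_alt
    rw [if_pos hg, if_pos hg]
  · rw [transform_eq_applyW grid hpre hg]
    apply List.ext_getElem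
    · rw [length_applyW, length_transform_alt grid hg]
    · intro r h1 h2
      apply List.ext_getElem
      · rw [← List.getD_eq_getElem _ [] h1, ← List.getD_eq_getElem _ [] h2,
          getD_len_applyW, getD_len_transform_alt grid hg]
      · intro c hc1 hc2
        have hr : r < grid.length := by rwa [length_applyW] at h1
        have hc : c < (grid.getD r []).length := by
          have h := hc1
          rw [← List.getD_eq_getElem _ [] h1, getD_len_applyW] at h
          exact h
        have e1 : (applyW grid _)[r][c] = cell (applyW grid
            (rowWrites grid (fun xs => gaps (bluesAux 0 (xs.take (grid.headD []).length)))
              ++ colWrites grid (fun xs => gaps (bluesAux 0 xs)))) r c := by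
          rw [cell, List.getD_eq_getElem _ [] h1, List.getD_eq_getElem _ 0 hc1]
        have e2 : (transform_alt grid)[r][c] = cell (transform_alt grid) r c := by
          rw [cell, List.getD_eq_getElem _ [] h2, List.getD_eq_getElem _ 0 hc2]
        rw [e1, e2, cell_applyW, cell_transform_alt grid hpre hg r c hr hc,
          if_congr (Iff.trans (and_iff_left_of_imp (fun _ => ⟨hr, hc⟩))
            (mem_writes_iff_pred grid hpre r c hr)) rfl rfl]

-- ===== VERDICT (by name: the statement is the Claim_ definition above) =====
theorem transform_spec : Claim_equal_transform := by
  intro grid _ hpre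
  unfold Spec_transform
  exact main_eq grid hpre
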